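-- pv_equiv track=rewrite | github.com/zanvat41/Slide-Puzzle | puzzleSolver.py | state2move
-- ===== SOURCE A (Python) =====
-- def findGap(board):
--     for i in range(len(board)):
--         for j in range(len(board[i])):
--             if board[i][j] == 0:
--                 return i,j
--     return -1, -1
--
-- def state2move(l):
--     if len(l) < 2:
--         return []
--     result = []
--     x, y = findGap(l[0])
--     for i in range(1, len(l)):
--         x1, y1 = findGap(l[i])
--         move = [x1 - x, y1 - y]
--         result.append(move)
--         x = x1
--         y = y1
--     return result
-- ===== SOURCE B (Python) =====
-- def findGapFlat(board):
--     # locate the first 0 by flattening: flat position, then convert via row lengths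
--     flat = [v for row in board for v in row]
--     if 0 not in flat:
--         return -1, -1
--     k = flat.index(0)
--     i = 0
--     for row in board:
--         if k < len(row):
--             return i, k
--         k -= len(row)
--         i += 1
--
-- def state2move(l):
--     return [[x2 - x1, y2 - y1]
--             for (a, b) in zip(l, l[1:])
--             for (x1, y1) in [findGapFlat(a)]
--             for (x2, y2) in [findGapFlat(b)]]
-- ===== Notes on version B (the rewrite author's own statement) =====
-- stated objective: alternative
-- what changed: The gap is located by flattening the board and taking flat.index(0), then converting the flat index back to (row, col) by walking row lengths, instead of A's nested row/column scan; and each move is computed independently from its pair of consecutive boards (each board's gap recomputed per pair) instead of A's single loop threading the previous gap through mutable state.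
import Mathlib
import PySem

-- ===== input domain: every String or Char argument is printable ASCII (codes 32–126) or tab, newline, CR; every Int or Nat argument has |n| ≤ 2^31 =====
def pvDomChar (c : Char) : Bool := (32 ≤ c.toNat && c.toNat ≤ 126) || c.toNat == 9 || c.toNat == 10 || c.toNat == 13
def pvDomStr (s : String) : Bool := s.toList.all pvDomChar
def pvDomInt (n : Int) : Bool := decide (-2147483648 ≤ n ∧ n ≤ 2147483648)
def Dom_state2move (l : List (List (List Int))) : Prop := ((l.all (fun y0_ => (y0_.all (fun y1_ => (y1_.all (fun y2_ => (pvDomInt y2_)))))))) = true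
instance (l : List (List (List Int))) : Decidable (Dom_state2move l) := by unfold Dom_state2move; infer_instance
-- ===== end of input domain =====

-- B locates the gap by flattening the board + index-of-0 + a row-length walk (vs A's nested scan), and computes each move independently per consecutive pair (vs A's loop carrying the previous gap); objective: alternative.


-- ===== PORT A =====
-- inner loop of A's findGap: scan row for a 0, j is the running column index
def findGapRow (row : List Int) (j : Int) : Option Int :=
  match row with
  | [] => none
  | v :: rest => if v = 0 then some j else findGapRow rest (j + 1)

-- A's findGap: outer loop over rows, i is the running row index; (-1,-1) if no zero
def findGap (board : List (List Int)) (i : Int) : Int × Int :=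
  match board with
  | [] => (-1, -1)
  | r :: rest =>
    match findGapRow r 0 with
    | some j => (i, j)
    | none => findGap rest (i + 1)

-- the for-loop of A: carries the previous gap (x, y), appends one move per board
def state2moveLoop (prev : Int × Int) (rest : List (List (List Int))) : List (List Int) :=
  match rest with
  | [] => []
  | b :: bs =>
    let g := findGap b 0
    [g.1 - prev.1, g.2 - prev.2] :: state2moveLoop g bs

def state2move (l : List (List (List Int))) : List (List Int) :=
  if l.length < 2 then []
  else
    match l with
    | [] => []
    | b0 :: rest => state2moveLoop (findGap b0 0) rest

-- ===== PORT B =====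
-- the 'for row in board' walk of findGapFlat: convert flat index k to (row, col);
-- Python falls off the loop only when k is past the end, which findGapFlat never reaches
-- (k comes from flat.index(0)); the [] case carries a placeholder (-1,-1)
def flatToCoord (rows : List (List Int)) (k : Nat) (i : Int) : Int × Int :=
  match rows with
  | [] => (-1, -1)
  | r :: rest => if k < r.length then (i, (k : Int)) else flatToCoord rest (k - r.length) (i + 1)

-- findGapFlat: flatten, test membership / take the first index of 0 (index? none ↔ '0 not in flat'),
-- then walk row lengths to convert
def findGapFlat (board : List (List Int)) : Int × Int :=
  let flat := board.flatten
  match PySem.List.index? flat 0 with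
  | none => (-1, -1)
  | some k => flatToCoord board k 0

def state2move_alt (l : List (List (List Int))) : List (List Int) :=
  (l.zip l.tail).map (fun p =>
    let g1 := findGapFlat p.1
    let g2 := findGapFlat p.2
    [g2.1 - g1.1, g2.2 - g1.2])

-- ===== PRECONDITION & SPEC =====
def Spec_state2move (l : List (List (List Int))) (out : List (List Int)) : Prop := out = state2move_alt l
instance (l : List (List (List Int))) (out : List (List Int)) : Decidable (Spec_state2move l out) := by unfold Spec_state2move; infer_instance

-- ===== CLAIM (what is proved, stated in full; the proofs are below) =====
def Claim_equal_state2move : Prop := ∀ (l : List (List (List Int))), Dom_state2move l → Spec_state2move l (state2move l)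

-- ===== LEMMAS AND PROOFS =====

-- A's row scan is index-of-0 shifted by the starting column
theorem findGapRow_eq_index (row : List Int) (j : Int) :
    findGapRow row j = (PySem.List.index? row 0).map (fun n => j + (n : Int)) := by
  induction row generalizing j with
  | nil => simp [findGapRow]
  | cons v rest ih =>
    by_cases hv : v = 0
    · subst hv
      rw [findGapRow, if_pos rfl, PySem.List.index?_cons_self]
      simp
    · rw [findGapRow, if_neg hv, ih, PySem.List.index?_cons_of_ne _ hv]
      cases PySem.List.index? rest 0 with
      | none => rfl
      | some n =>
        simp
        omega

theorem index?_append_of_not_mem {a : Type} [DecidableEq a] (l t : List a) (v : a)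
    (h : v ∉ l) :
    PySem.List.index? (l ++ t) v = (PySem.List.index? t v).map (· + l.length) := by
  induction l with
  | nil => simp
  | cons x xs ih =>
    rw [List.mem_cons, not_or] at h
    have hx : x ≠ v := fun e => h.1 e.symm
    rw [List.cons_append, PySem.List.index?_cons_of_ne _ hx, ih h.2]
    cases PySem.List.index? t v with
    | none => rfl
    | some n =>
      simp only [Option.map_some, Option.some.injEq, List.length_cons]
      omega

-- no zero anywhere: A returns (-1,-1) from any starting row index
theorem findGap_of_no_zero (rows : List (List Int)) (i : Int)
    (h : (0 : Int) ∉ rows.flatten) : findGap rows i = (-1, -1) := by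
  induction rows generalizing i with
  | nil => rfl
  | cons r rest ih =>
    rw [List.flatten_cons, List.mem_append, not_or] at h
    rw [findGap, findGapRow_eq_index, (PySem.List.index?_eq_none_iff _ _).mpr h.1]
    exact ih _ h.2

-- the conversion walk agrees with A's nested scan when k is the first flat index of 0
theorem flatToCoord_correct (rows : List (List Int)) (k : Nat) (i : Int)
    (h : PySem.List.index? rows.flatten 0 = some k) :
    flatToCoord rows k i = findGap rows i := by
  induction rows generalizing k i with
  | nil => simp at h
  | cons r rest ih =>
    rw [List.flatten_cons] at h
    by_cases hr : (0 : Int) ∈ r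
    · rw [PySem.List.index?_append_of_mem _ hr] at h
      obtain ⟨hk, -, -⟩ := PySem.List.getElem_of_index?_eq_some h
      rw [flatToCoord, if_pos hk, findGap, findGapRow_eq_index, h]
      simp
    · rw [index?_append_of_not_mem _ _ _ hr] at h
      cases hm : PySem.List.index? rest.flatten 0 with
      | none => rw [hm] at h; simp at h
      | some m =>
        rw [hm] at h
        simp only [Option.map_some, Option.some.injEq] at h
        rw [flatToCoord, if_neg (by omega), findGap, findGapRow_eq_index,
            (PySem.List.index?_eq_none_iff _ _).mpr hr]
        have hkm : k - r.length = m := by omega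
        rw [hkm]
        exact ih _ _ hm

-- hence B's gap finder equals A's
theorem findGapFlat_eq_findGap (board : List (List Int)) :
    findGapFlat board = findGap board 0 := by
  cases h : PySem.List.index? board.flatten 0 with
  | none =>
    simp only [findGapFlat, h]
    exact (findGap_of_no_zero board 0 ((PySem.List.index?_eq_none_iff _ _).mp h)).symm
  | some k =>
    simp only [findGapFlat, h]
    exact flatToCoord_correct board k 0 h

-- A's carried-state loop produces exactly the per-pair differences B emits
theorem loop_eq_pairs (rest : List (List (List Int))) (b : List (List Int)) :
    state2moveLoop (findGap b 0) rest =
      ((b :: rest).zip rest).map (fun p =>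
        let g1 := findGapFlat p.1
        let g2 := findGapFlat p.2
        [g2.1 - g1.1, g2.2 - g1.2]) := by
  induction rest generalizing b with
  | nil => rfl
  | cons c cs ih =>
    simp only [state2moveLoop, List.zip_cons_cons, List.map_cons]
    refine congrArg₂ List.cons ?_ (ih c)
    simp [findGapFlat_eq_findGap]

-- ===== VERDICT (by name: the statement is the Claim_ definition above) =====
theorem state2move_spec : Claim_equal_state2move := by
  intro l _
  unfold Spec_state2move state2move state2move_alt
  match l with
  | [] => rfl
  | [b] => rfl
  | b0 :: b1 :: bs =>
    rw [if_neg (by simp only [List.length_cons]; omega), List.tail_cons]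
    exact loop_eq_pairs (b1 :: bs) b0
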